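-- pv_equiv track=rewrite | github.com/stevenmburns/adventofcode | 2021/11/test_A.py | step
-- ===== SOURCE A (Python) =====
-- def step(data):
--     m = len(data)
--     n = len(data[0])
--
--     def adjacent(u):
--         i, j = u
--         for di in range(-1,2):
--             for dj in range(-1,2):
--                 if di == 0 and dj == 0:
--                     continue
--                 if 0 <= i+di < m and 0 <= j+dj < n:
--                     yield (i+di, j+dj)
--
--     for i in range(m):
--         for j in range(n):
--             data[i][j] += 1
--
--     frontier = set()
--     for i in range(m):
--         for j in range(n):
--             if data[i][j] > 9:
--                 frontier.add((i,j))
--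
--     flash = set()
--
--     while frontier:
--         newfrontier = set()
--         for i,j in frontier:
--             for ii, jj in adjacent((i,j)):
--                 data[ii][jj] += 1
--                 if data[ii][jj] > 9:
--                     newfrontier.add((ii,jj))
--         flash.update(frontier)
--         frontier = newfrontier.difference(flash)
--
--     for i, j in flash:
--         data[i][j] = 0
--
--     return data, len(flash)
-- ===== SOURCE B (Python) =====
-- def step(data):
--     m = len(data)
--     n = len(data[0])
--
--     def nbs(i, j):
--         return [(i + di, j + dj) for di in (-1, 0, 1) for dj in (-1, 0, 1)
--                 if (di or dj) and 0 <= i + di < m and 0 <= j + dj < n]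
--
--     def val(i, j, s):
--         return data[i][j] + 1 + sum(v in s for v in nbs(i, j))
--
--     flashed = set()
--     while True:
--         new = [(i, j) for i in range(m) for j in range(n)
--                if (i, j) not in flashed and val(i, j, flashed) > 9]
--         if not new:
--             break
--         flashed.update(new)
--
--     for i in range(m):
--         for j in range(n):
--             data[i][j] = 0 if (i, j) in flashed else val(i, j, flashed)
--     return data, len(flashed)
-- ===== Notes on version B (the rewrite author's own statement) =====
-- stated objective: alternative
-- what changed: A propagates flashes with a BFS frontier/newfrontier of sets, incrementally mutating the grid; B instead computes the flashed set as a chaotic (Jacobi) fixpoint iteration of the predicate 'value from base plus flashed-neighbour count exceeds 9' recomputed from the original grid each round, and only then writes the final grid in one pass.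
-- outside the precondition, e.g. on step([]): A raises IndexError, B raises IndexError
import Mathlib
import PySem

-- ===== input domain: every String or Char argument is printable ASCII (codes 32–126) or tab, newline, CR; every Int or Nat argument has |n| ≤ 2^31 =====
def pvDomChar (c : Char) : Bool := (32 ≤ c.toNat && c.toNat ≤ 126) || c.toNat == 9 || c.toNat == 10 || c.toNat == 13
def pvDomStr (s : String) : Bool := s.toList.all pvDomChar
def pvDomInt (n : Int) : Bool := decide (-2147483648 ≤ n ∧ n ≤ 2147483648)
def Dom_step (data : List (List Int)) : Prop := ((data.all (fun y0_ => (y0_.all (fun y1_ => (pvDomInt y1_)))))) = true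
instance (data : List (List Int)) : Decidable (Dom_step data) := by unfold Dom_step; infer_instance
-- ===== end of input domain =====

-- B replaces A's BFS frontier propagation by a whole-set chaotic (Jacobi) fixpoint iteration
-- recomputed from the original grid; objective: alternative algorithm, not faster.
-- Both Pythons mutate `data` in place the same way; the equivalence proved here is about the return value.

-- shared low-level grid access (all call sites have 0 ≤ indices, so .toNat is exact)
def gget (g : List (List Int)) (i j : Int) : Int := (g.getD i.toNat []).getD j.toNat 0
def upd2 (g : List (List Int)) (i j : Int) (f : Int → Int) : List (List Int) :=
  g.modify i.toNat (fun row => row.modify j.toNat f)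

-- ===== PORT A =====
-- the generator `adjacent`, materialised as the list of its yields
def aAdj (m n : Int) (u : Int × Int) : List (Int × Int) :=
  (PySem.List.pyRange (-1) 2 1).foldl (fun acc di =>
    (PySem.List.pyRange (-1) 2 1).foldl (fun acc dj =>
      if di = 0 ∧ dj = 0 then acc
      else if 0 ≤ u.1 + di ∧ u.1 + di < m ∧ 0 ≤ u.2 + dj ∧ u.2 + dj < n then
        acc ++ [(u.1 + di, u.2 + dj)]
      else acc) acc) []

-- body of one `while` iteration: bump all neighbours of the frontier, collecting `newfrontier`
def aRound (m n : Int) (g : List (List Int)) (fr : List (Int × Int)) :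
    List (List Int) × PySem.Set (Int × Int) :=
  fr.foldl (fun p u =>
    (aAdj m n u).foldl (fun p v =>
      let g2 := upd2 p.1 v.1 v.2 (· + 1)
      if gget g2 v.1 v.2 > 9 then (g2, PySem.Set.add p.2 v) else (g2, p.2)) p)
    (g, PySem.Set.empty)

-- the `while frontier:` loop; fuel m*n+1 is proved sufficient (each pass grows `flash`)
def aLoop (m n : Int) : Nat → List (List Int) → List (Int × Int) → List (Int × Int) →
    List (List Int) × List (Int × Int)
  | 0, g, _fr, fl => (g, fl)
  | fuel+1, g, fr, fl =>
    if fr.isEmpty then (g, fl)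
    else
      let p := aRound m n g fr
      let fl' : PySem.Set (Int × Int) := PySem.Set.update fl fr
      aLoop m n fuel p.1 (PySem.Set.diff p.2 fl') fl'

def step (data : List (List Int)) : List (List Int) × Int :=
  let m : Int := data.length
  let n : Int := (data.headI).length   -- data[0]; Pre_step excludes data = []
  let d1 := (PySem.List.pyRange 0 m 1).foldl (fun g i =>
      (PySem.List.pyRange 0 n 1).foldl (fun g j => upd2 g i j (· + 1)) g) data
  let fr0 : PySem.Set (Int × Int) := (PySem.List.pyRange 0 m 1).foldl (fun s i =>
      (PySem.List.pyRange 0 n 1).foldl (fun s j =>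
        if gget d1 i j > 9 then PySem.Set.add s (i, j) else s) s) PySem.Set.empty
  let r := aLoop m n (data.length * (data.headI).length + 1) d1 fr0 []
  let g3 := r.2.foldl (fun g u => upd2 g u.1 u.2 (fun _ => 0)) r.1
  (g3, (r.2.length : Int))

-- ===== PORT B =====
-- the `nbs` comprehension
def bNbs (m n i j : Int) : List (Int × Int) :=
  ([-1, 0, 1] : List Int).foldl (fun acc di =>
    ([-1, 0, 1] : List Int).foldl (fun acc dj =>
      if (¬(di = 0 ∧ dj = 0)) ∧ 0 ≤ i + di ∧ i + di < m ∧ 0 ≤ j + dj ∧ j + dj < n then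
        acc ++ [(i + di, j + dj)]
      else acc) acc) []

-- `val`: original value + 1 + number of flashed neighbours (sum of booleans = countP)
def bVal (data : List (List Int)) (m n i j : Int) (s : List (Int × Int)) : Int :=
  gget data i j + 1 + ((bNbs m n i j).countP (fun v => s.contains v) : Int)

-- the index pairs [(i,j) for i in range(m) for j in range(n)]
def bCells (m n : Int) : List (Int × Int) :=
  (PySem.List.pyRange 0 m 1).flatMap (fun i => (PySem.List.pyRange 0 n 1).map (fun j => (i, j)))

-- the `while True:` fixpoint loop; fuel m*n+1 is proved sufficient (flashed grows each pass)
def bLoop (data : List (List Int)) (m n : Int) : Nat → List (Int × Int) → List (Int × Int)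
  | 0, fl => fl
  | fuel+1, fl =>
    let new := (bCells m n).filter
      (fun u => !fl.contains u && decide (bVal data m n u.1 u.2 fl > 9))
    if new.isEmpty then fl else bLoop data m n fuel (PySem.Set.update fl new)

def step_alt (data : List (List Int)) : List (List Int) × Int :=
  let m : Int := data.length
  let n : Int := (data.headI).length   -- data[0]; Pre_step excludes data = []
  let fl := bLoop data m n (data.length * (data.headI).length + 1) []
  -- final write-back; Python's val reads data[i][j] before that cell is overwritten,
  -- so reading the original `data` here is exact
  let g := (PySem.List.pyRange 0 m 1).foldl (fun g i =>
      (PySem.List.pyRange 0 n 1).foldl (fun g j =>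
        upd2 g i j (fun _ => if fl.contains (i, j) then 0 else bVal data m n i j fl)) g) data
  (g, (fl.length : Int))

-- ===== PRECONDITION & SPEC =====
-- Pre_step is exactly where A returns: A raises IndexError on data = [] (len(data[0]))
-- and on any row shorter than the first row (data[i][j] for j < n).
def Pre_step (data : List (List Int)) : Prop :=
  data ≠ [] ∧ ∀ row ∈ data, (data.headI).length ≤ row.length
instance (data : List (List Int)) : Decidable (Pre_step data) := by unfold Pre_step; infer_instance

def pvWitness_step : List (List Int) := [[9, 1], [0, 5]]

def Spec_step (data : List (List Int)) (out : List (List Int) × Int) : Prop := out = step_alt data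
instance (data : List (List Int)) (out : List (List Int) × Int) : Decidable (Spec_step data out) := by unfold Spec_step; infer_instance

-- ===== CLAIM (what is proved, stated in full; the proofs are below) =====
def Claim_equal_step : Prop := ∀ (data : List (List Int)), Dom_step data → Pre_step data → Spec_step data (step data)

-- ===== LEMMAS AND PROOFS =====

-- ---------- abstract model ----------
-- number of flashed neighbours of u
def cnt (m n : Int) (S : List (Int × Int)) (u : Int × Int) : Nat :=
  (aAdj m n u).countP (fun v => S.contains v)

-- the value cell u would hold once exactly the cells of S have flashed
def pval (data : List (List Int)) (m n : Int) (S : List (Int × Int)) (u : Int × Int) : Int :=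
  gget data u.1 u.2 + 1 + (cnt m n S u : Int)

-- S is closed: no unflashed cell is above 9
def IsClosedSet (data : List (List Int)) (m n : Int) (S : List (Int × Int)) : Prop :=
  ∀ u ∈ bCells m n, u ∉ S → pval data m n S u ≤ 9

-- L is a legal flash order continuing from acc: each cell is forced by its predecessors
def SuppFrom (data : List (List Int)) (m n : Int) : List (Int × Int) → List (Int × Int) → Prop
  | _, [] => True
  | acc, u :: rest =>
      u ∈ bCells m n ∧ u ∉ acc ∧ pval data m n acc u > 9 ∧
      SuppFrom data m n (acc ++ [u]) rest

-- same shape (row count and row lengths)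
def Sh (g h : List (List Int)) : Prop := g.map List.length = h.map List.length

-- well-formed m×(≥n) grid
def GOK (m n : Int) (g : List (List Int)) : Prop :=
  (g.length : Int) = m ∧ ∀ row ∈ g, n ≤ (row.length : Int)

-- generic one-write-per-position fold
def posFold (F : Int × Int → Int → Int) (L : List (Int × Int)) (g : List (List Int)) :
    List (List Int) :=
  L.foldl (fun g v => upd2 g v.1 v.2 (F v)) g

-- +1 at every position of L, duplicates allowed
def bumpAll (L : List (Int × Int)) (g : List (List Int)) : List (List Int) :=
  L.foldl (fun g v => upd2 g v.1 v.2 (· + 1)) g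

-- ---------- basic grid lemmas ----------
theorem sh_refl (g : List (List Int)) : Sh g g := rfl

theorem sh_trans {g h k : List (List Int)} (h1 : Sh g h) (h2 : Sh h k) : Sh g k := by
  unfold Sh at *; rw [h1, h2]

theorem sh_upd2 (g : List (List Int)) (i j : Int) (f : Int → Int) : Sh (upd2 g i j f) g := by
  unfold Sh upd2
  apply List.ext_getElem (by simp)
  intro k h1 h2
  simp only [List.getElem_map, List.getElem_modify]
  split <;> simp

theorem gok_of_sh {m n : Int} {g h : List (List Int)} (hs : Sh g h) (hg : GOK m n h) :
    GOK m n g := by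
  have hlen : g.length = h.length := by
    have := congrArg List.length hs; simpa using this
  constructor
  · rw [hlen]; exact hg.1
  · intro row hrow
    obtain ⟨i, hi, rfl⟩ := List.mem_iff_getElem.mp hrow
    have h2 : (g.map List.length)[i]? = (h.map List.length)[i]? := by rw [hs]
    rw [List.getElem?_map, List.getElem?_map, List.getElem?_eq_getElem hi,
      List.getElem?_eq_getElem (by omega)] at h2
    simp only [Option.map_some, Option.some_inj] at h2
    rw [h2]
    exact hg.2 _ (List.getElem_mem _)

theorem getD_modify_ne (f : Int → Int) (row : List Int) {a b : Nat} (h : b ≠ a) :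
    (row.modify b f).getD a 0 = row.getD a 0 := by
  rw [List.getD_eq_getElem?_getD, List.getD_eq_getElem?_getD, List.getElem?_modify]
  cases hrj : row[a]? with
  | none => simp
  | some x => simp [h]

theorem gget_upd2_self {g : List (List Int)} {i j : Int} (f : Int → Int)
    (hi0 : 0 ≤ i) (hj0 : 0 ≤ j) (hi : i.toNat < g.length)
    (hj : j.toNat < (g.getD i.toNat []).length) :
    gget (upd2 g i j f) i j = f (gget g i j) := by
  unfold gget upd2
  have hg1 : g.getD i.toNat [] = g[i.toNat] := List.getD_eq_getElem _ _ hi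
  have hlen : i.toNat < (g.modify i.toNat fun row => row.modify j.toNat f).length := by
    simpa using hi
  rw [List.getD_eq_getElem _ _ hlen, List.getElem_modify, if_pos rfl, hg1]
  have hj2 : j.toNat < g[i.toNat].length := by rw [hg1] at hj; exact hj
  have hj3 : j.toNat < (g[i.toNat].modify j.toNat f).length := by
    rw [List.length_modify]; exact hj2
  rw [List.getD_eq_getElem _ _ hj3, List.getElem_modify, if_pos rfl,
    List.getD_eq_getElem _ _ hj2]

theorem gget_upd2_ne {g : List (List Int)} {i j i' j' : Int} (f : Int → Int)
    (hi0 : 0 ≤ i) (hj0 : 0 ≤ j) (hi'0 : 0 ≤ i') (hj'0 : 0 ≤ j')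
    (hne : ¬(i' = i ∧ j' = j)) :
    gget (upd2 g i j f) i' j' = gget g i' j' := by
  unfold gget upd2
  have hrow : (g.modify i.toNat fun row => row.modify j.toNat f).getD i'.toNat []
      = if i.toNat = i'.toNat then (g.getD i'.toNat []).modify j.toNat f
        else g.getD i'.toNat [] := by
    rw [List.getD_eq_getElem?_getD, List.getD_eq_getElem?_getD, List.getElem?_modify]
    cases hgi : g[i'.toNat]? with
    | none => split <;> simp
    | some row => by_cases hc : i.toNat = i'.toNat <;> simp [hc]
  rw [hrow]
  by_cases hii : i.toNat = i'.toNat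
  · have hji : j.toNat ≠ j'.toNat := by omega
    rw [if_pos hii]
    exact getD_modify_ne f _ hji
  · rw [if_neg hii]

-- ---------- cells / adjacency ----------
theorem mem_bCells (m n : Int) (u : Int × Int) :
    u ∈ bCells m n ↔ 0 ≤ u.1 ∧ u.1 < m ∧ 0 ≤ u.2 ∧ u.2 < n := by
  simp only [bCells, List.mem_flatMap, List.mem_map, PySem.List.mem_pyRange_one]
  constructor
  · rintro ⟨i, hi, j, hj, rfl⟩; simp; omega
  · rintro ⟨h1, h2, h3, h4⟩
    exact ⟨u.1, by omega, u.2, by omega, by simp⟩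

theorem nodup_bCells (m n : Int) : (bCells m n).Nodup := by
  unfold bCells
  rw [List.nodup_flatMap]
  constructor
  · intro i _
    exact (PySem.List.nodup_pyRange_one 0 n).map (fun a b h => by
      simpa using congrArg Prod.snd h)
  · refine List.Pairwise.imp ?_ (PySem.List.pairwise_lt_pyRange_one 0 m)
    intro a b hab
    intro x hx hy
    simp only [List.mem_map] at hx hy
    obtain ⟨j1, _, rfl⟩ := hx
    obtain ⟨j2, _, h2⟩ := hy
    have := congrArg Prod.fst h2
    simp at this
    omega

theorem length_bCells (m n : Int) : (bCells m n).length = (m.toNat) * (n.toNat) := by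
  unfold bCells
  rw [List.length_flatMap]
  have h1 : ∀ i : Int, ((PySem.List.pyRange 0 n 1).map (fun j => (i, j))).length = n.toNat := by
    intro i; simp [PySem.List.length_pyRange_one]
  simp only [List.length_map, PySem.List.length_pyRange_one]
  rw [List.map_const', List.sum_replicate, smul_eq_mul, PySem.List.length_pyRange_one]
  norm_num

theorem inbox_valid {m n : Int} {g : List (List Int)} (hg : GOK m n g) {v : Int × Int}
    (hv : v ∈ bCells m n) :
    v.1.toNat < g.length ∧ v.2.toNat < (g.getD v.1.toNat []).length := by
  rw [mem_bCells] at hv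
  obtain ⟨h1, h2, h3, h4⟩ := hv
  have hl : v.1.toNat < g.length := by
    have := hg.1; omega
  refine ⟨hl, ?_⟩
  have hrow : n ≤ ((g.getD v.1.toNat []).length : Int) := by
    rw [List.getD_eq_getElem _ _ hl]
    exact hg.2 _ (List.getElem_mem _)
  omega

theorem if_skip_merge {c d : Prop} [Decidable c] [Decidable d] (acc : List (Int × Int))
    (x : Int × Int) :
    (if c then acc else if d then acc ++ [x] else acc) = if ¬c ∧ d then acc ++ [x] else acc := by
  split_ifs <;> first | rfl | tauto

-- aAdj as a flat comprehension
theorem aAdj_eq_flat (m n : Int) (u : Int × Int) :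
    aAdj m n u = ([-1, 0, 1] : List Int).flatMap (fun di =>
      (([-1, 0, 1] : List Int).filter (fun dj => decide (¬(di = 0 ∧ dj = 0) ∧
        0 ≤ u.1 + di ∧ u.1 + di < m ∧ 0 ≤ u.2 + dj ∧ u.2 + dj < n))).map
          (fun dj => (u.1 + di, u.2 + dj))) := by
  have hr : PySem.List.pyRange (-1) 2 1 = [-1, 0, 1] := by decide
  unfold aAdj
  rw [hr]
  simp only [if_skip_merge]
  simp only [PySem.List.foldl_append_ite]
  rw [PySem.List.foldl_append_eq_flatMap]
  simp

theorem mem_aAdj (m n : Int) (u v : Int × Int) :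
    v ∈ aAdj m n u ↔ v ≠ u ∧ u.1 - 1 ≤ v.1 ∧ v.1 ≤ u.1 + 1 ∧ u.2 - 1 ≤ v.2 ∧ v.2 ≤ u.2 + 1 ∧
      0 ≤ v.1 ∧ v.1 < m ∧ 0 ≤ v.2 ∧ v.2 < n := by
  rw [aAdj_eq_flat]
  obtain ⟨v1, v2⟩ := v
  obtain ⟨u1, u2⟩ := u
  simp only [List.mem_flatMap, List.mem_map, List.mem_filter, List.mem_cons,
    List.not_mem_nil, or_false, decide_eq_true_eq, ne_eq, Prod.mk.injEq, not_and]
  constructor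
  · rintro ⟨di, hdi, dj, ⟨hdj, hcond⟩, he⟩
    obtain ⟨he1, he2⟩ := he
    omega
  · rintro ⟨hne, h1, h2, h3, h4, h5, h6, h7, h8⟩
    refine ⟨v1 - u1, by omega, v2 - u2, ⟨by omega, ⟨by omega, by omega, by omega, by omega, by omega⟩⟩, ?_⟩
    omega

theorem nodup_aAdj (m n : Int) (u : Int × Int) : (aAdj m n u).Nodup := by
  rw [aAdj_eq_flat]
  rw [List.nodup_flatMap]
  constructor
  · intro di _
    refine List.Nodup.map (fun a b h => by simpa using congrArg Prod.snd h) ?_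
    exact List.Nodup.filter _ (by decide)
  · have hp : ([-1, 0, 1] : List Int).Pairwise (· ≠ ·) := by decide
    refine hp.imp ?_
    intro a b hab x hx hy
    simp only [List.mem_map, List.mem_filter] at hx hy
    obtain ⟨j1, _, rfl⟩ := hx
    obtain ⟨j2, _, h2⟩ := hy
    have := congrArg Prod.fst h2
    simp at this
    omega

theorem bNbs_eq_aAdj (m n i j : Int) : bNbs m n i j = aAdj m n (i, j) := by
  have hr : PySem.List.pyRange (-1) 2 1 = [-1, 0, 1] := by decide
  unfold bNbs aAdj
  rw [hr]
  simp only [if_skip_merge]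

theorem aAdj_symm {m n : Int} {u v : Int × Int} (hu : u ∈ bCells m n) (hv : v ∈ bCells m n) :
    u ∈ aAdj m n v ↔ v ∈ aAdj m n u := by
  rw [mem_bCells] at hu hv
  rw [mem_aAdj, mem_aAdj]
  obtain ⟨v1, v2⟩ := v; obtain ⟨u1, u2⟩ := u
  simp only [ne_eq, Prod.mk.injEq, not_and] at *
  constructor <;> rintro ⟨hn, h⟩ <;>
    refine ⟨?_, by omega, by omega, by omega, by omega, by omega, by omega, by omega, by omega⟩ <;>
    intro he1 he2 <;> subst he1 <;> subst he2 <;> exact hn rfl rfl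

-- ---------- pval / cnt lemmas ----------
theorem cnt_nil (m n : Int) (u : Int × Int) : cnt m n [] u = 0 := by
  unfold cnt
  simp

theorem cnt_mono {m n : Int} {S T : List (Int × Int)} (h : ∀ x ∈ S, x ∈ T) (u : Int × Int) :
    cnt m n S u ≤ cnt m n T u := by
  unfold cnt
  refine List.countP_mono_left ?_
  intro x _ hx
  rw [List.contains_iff_mem] at *
  exact h x hx

theorem pval_mono {data : List (List Int)} {m n : Int} {S T : List (Int × Int)}
    (h : ∀ x ∈ S, x ∈ T) (u : Int × Int) :
    pval data m n S u ≤ pval data m n T u := by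
  unfold pval
  have := cnt_mono (m := m) (n := n) h u
  omega

theorem pval_congr {data : List (List Int)} {m n : Int} {S T : List (Int × Int)}
    (h : ∀ x, x ∈ S ↔ x ∈ T) (u : Int × Int) :
    pval data m n S u = pval data m n T u := by
  unfold pval cnt
  have : (aAdj m n u).countP (fun v => S.contains v)
      = (aAdj m n u).countP (fun v => T.contains v) := by
    refine List.countP_congr ?_
    intro x _
    rw [List.contains_iff_mem, List.contains_iff_mem]
    exact h x
  omega

theorem cnt_append_disjoint {m n : Int} {S T : List (Int × Int)}
    (h : ∀ x ∈ T, x ∉ S) (u : Int × Int) :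
    cnt m n (S ++ T) u = cnt m n S u + cnt m n T u := by
  unfold cnt
  induction aAdj m n u with
  | nil => simp
  | cons a l ih =>
    simp only [List.countP_cons, ih]
    by_cases hS : a ∈ S <;> by_cases hT : a ∈ T
    · exact absurd hS (h a hT)
    all_goals
      simp only [List.contains_iff_mem, List.mem_append]
      simp [hS, hT]
      try omega

theorem count_flatMap_aAdj {m n : Int} {fr : List (Int × Int)} (hnd : fr.Nodup)
    (hfr : ∀ w ∈ fr, w ∈ bCells m n) {u : Int × Int} (hu : u ∈ bCells m n) :
    (fr.flatMap (aAdj m n)).count u = cnt m n fr u := by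
  rw [List.count_flatMap]
  have h1 : ∀ w ∈ fr, (List.count u ∘ aAdj m n) w = if u ∈ aAdj m n w then 1 else 0 := by
    intro w _
    simp only [Function.comp_apply]
    split
    · rename_i hw
      exact List.count_eq_one_of_mem (nodup_aAdj m n w) hw
    · rename_i hw
      exact List.count_eq_zero.mpr hw
  rw [List.map_congr_left h1]
  have h2 : ∀ w ∈ fr, (if u ∈ aAdj m n w then 1 else 0)
      = (if w ∈ aAdj m n u then 1 else 0) := by
    intro w hw
    have hs := aAdj_symm hu (hfr w hw)
    by_cases hc : w ∈ aAdj m n u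
    · rw [if_pos hc, if_pos (hs.mpr hc)]
    · rw [if_neg hc, if_neg (fun hcc => hc (hs.mp hcc))]
  rw [List.map_congr_left h2]
  -- sum of 0/1 indicators is countP, and both filters have the same members
  have h3 : ∀ l : List (Int × Int), (l.map (fun w => if w ∈ aAdj m n u then 1 else 0)).sum
      = (l.filter (fun w => decide (w ∈ aAdj m n u))).length := by
    intro l
    induction l with
    | nil => simp
    | cons a l ih =>
      simp only [List.map_cons, List.sum_cons, List.filter_cons]
      by_cases ha : a ∈ aAdj m n u <;> simp [ha, ih] <;> omega
  rw [h3 fr]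
  unfold cnt
  rw [List.countP_eq_length_filter]
  have hperm : (fr.filter (fun w => decide (w ∈ aAdj m n u))).Perm
      ((aAdj m n u).filter (fun v => fr.contains v)) := by
    rw [List.perm_ext_iff_of_nodup (hnd.filter _) ((nodup_aAdj m n u).filter _)]
    intro a
    simp [List.mem_filter, and_comm]
  exact hperm.length_eq

-- ---------- SuppFrom lemmas ----------
theorem suppFrom_append {data : List (List Int)} {m n : Int} :
    ∀ {L1 : List (Int × Int)} {acc L2 : List (Int × Int)},
    SuppFrom data m n acc L1 → SuppFrom data m n (acc ++ L1) L2 →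
    SuppFrom data m n acc (L1 ++ L2) := by
  intro L1
  induction L1 with
  | nil => intro acc L2 _ h2; simpa using h2
  | cons a l ih =>
    intro acc L2 h1 h2
    obtain ⟨ha1, ha2, ha3, ha4⟩ := h1
    refine ⟨ha1, ha2, ha3, ?_⟩
    refine ih ha4 ?_
    simpa using h2

theorem suppFrom_of_forced {data : List (List Int)} {m n : Int} :
    ∀ {fr : List (Int × Int)} {acc : List (Int × Int)}, fr.Nodup →
    (∀ u ∈ fr, u ∈ bCells m n ∧ u ∉ acc ∧ pval data m n acc u > 9) →
    SuppFrom data m n acc fr := by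
  intro fr
  induction fr with
  | nil => intro acc _ _; trivial
  | cons a l ih =>
    intro acc hnd hf
    obtain ⟨h1, h2, h3⟩ := hf a (by simp)
    refine ⟨h1, h2, h3, ?_⟩
    refine ih (hnd.of_cons) ?_
    intro u hu
    obtain ⟨g1, g2, g3⟩ := hf u (by simp [hu])
    refine ⟨g1, ?_, ?_⟩
    · simp only [List.mem_append, List.mem_singleton]
      rintro (h | rfl)
      · exact g2 h
      · exact (List.nodup_cons.mp hnd).1 hu
    · have := pval_mono (data := data) (m := m) (n := n)
        (S := acc) (T := acc ++ [a]) (by intro x hx; simp [hx]) u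
      omega

theorem supp_subset_closed {data : List (List Int)} {m n : Int} {T : List (Int × Int)}
    (hT : IsClosedSet data m n T) :
    ∀ {L acc : List (Int × Int)}, SuppFrom data m n acc L → (∀ x ∈ acc, x ∈ T) →
    ∀ x ∈ L, x ∈ T := by
  intro L
  induction L with
  | nil => intro acc _ _ x hx; simp at hx
  | cons a l ih =>
    intro acc hs hacc x hx
    obtain ⟨h1, h2, h3, h4⟩ := hs
    have haT : a ∈ T := by
      by_contra hc
      have := hT a h1 hc
      have := pval_mono (data := data) (m := m) (n := n) (S := acc) (T := T) hacc a
      omega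
    rcases List.mem_cons.mp hx with rfl | hx'
    · exact haT
    · refine ih h4 ?_ x hx'
      intro y hy
      rcases List.mem_append.mp hy with hy' | hy'
      · exact hacc y hy'
      · simpa using List.mem_singleton.mp hy' ▸ haT

-- ---------- fold characterisations ----------
theorem sh_posFold (F : Int × Int → Int → Int) (L : List (Int × Int)) (g : List (List Int)) :
    Sh (posFold F L g) g := by
  induction L generalizing g with
  | nil => exact sh_refl g
  | cons v L ih =>
    exact sh_trans (ih (upd2 g v.1 v.2 (F v))) (sh_upd2 g v.1 v.2 (F v))

theorem gget_posFold {m n : Int} (F : Int × Int → Int → Int) {L : List (Int × Int)}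
    (hnd : L.Nodup) (hL : ∀ v ∈ L, v ∈ bCells m n) {g : List (List Int)} (hg : GOK m n g)
    (u : Int × Int) (hu1 : 0 ≤ u.1) (hu2 : 0 ≤ u.2) :
    gget (posFold F L g) u.1 u.2 =
      if u ∈ L then F u (gget g u.1 u.2) else gget g u.1 u.2 := by
  induction L generalizing g with
  | nil => simp [posFold]
  | cons v L ih =>
    have hv := hL v (by simp)
    have hvc := (mem_bCells m n v).mp hv
    have hval := inbox_valid hg hv
    have hg1 : GOK m n (upd2 g v.1 v.2 (F v)) := gok_of_sh (sh_upd2 g v.1 v.2 (F v)) hg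
    have hstep : posFold F (v :: L) g = posFold F L (upd2 g v.1 v.2 (F v)) := rfl
    rw [hstep, ih hnd.of_cons (fun w hw => hL w (by simp [hw])) hg1]
    by_cases he : u = v
    · subst he
      have hnotL : u ∉ L := (List.nodup_cons.mp hnd).1
      rw [if_neg hnotL, if_pos (by simp)]
      exact gget_upd2_self (F u) (by omega) (by omega) hval.1 hval.2
    · have hne : ¬(u.1 = v.1 ∧ u.2 = v.2) := by
        intro hc
        exact he (Prod.ext_iff.mpr ⟨hc.1, hc.2⟩)
      rw [gget_upd2_ne (F v) (by omega) (by omega) hu1 hu2 hne]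
      by_cases hm : u ∈ L
      · rw [if_pos hm, if_pos (by simp [hm])]
      · rw [if_neg hm, if_neg (by simp [hm, he])]

theorem sh_bumpAll (L : List (Int × Int)) (g : List (List Int)) : Sh (bumpAll L g) g := by
  induction L generalizing g with
  | nil => exact sh_refl g
  | cons v L ih =>
    exact sh_trans (ih (upd2 g v.1 v.2 (· + 1))) (sh_upd2 g v.1 v.2 (· + 1))

theorem gget_bumpAll {m n : Int} {L : List (Int × Int)} (hL : ∀ v ∈ L, v ∈ bCells m n)
    {g : List (List Int)} (hg : GOK m n g) (u : Int × Int) (hu1 : 0 ≤ u.1) (hu2 : 0 ≤ u.2) :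
    gget (bumpAll L g) u.1 u.2 = gget g u.1 u.2 + L.count u := by
  induction L generalizing g with
  | nil => simp [bumpAll]
  | cons v L ih =>
    have hv := hL v (by simp)
    have hvc := (mem_bCells m n v).mp hv
    have hval := inbox_valid hg hv
    have hg1 : GOK m n (upd2 g v.1 v.2 (· + 1)) := gok_of_sh (sh_upd2 g v.1 v.2 _) hg
    have hstep : bumpAll (v :: L) g = bumpAll L (upd2 g v.1 v.2 (· + 1)) := rfl
    rw [hstep, ih (fun w hw => hL w (by simp [hw])) hg1]
    by_cases he : v = u
    · subst he
      rw [gget_upd2_self _ (by omega) (by omega) hval.1 hval.2]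
      rw [List.count_cons]
      simp
      omega
    · have hne : ¬(u.1 = v.1 ∧ u.2 = v.2) := by
        intro hc
        exact he (Prod.ext_iff.mpr ⟨hc.1.symm, hc.2.symm⟩)
      rw [gget_upd2_ne _ (by omega) (by omega) hu1 hu2 hne]
      rw [List.count_cons]
      simp [he]

-- monotonicity: bumping can only increase a cell
theorem gget_bumpAll_ge {m n : Int} {L : List (Int × Int)} (hL : ∀ v ∈ L, v ∈ bCells m n)
    {g : List (List Int)} (hg : GOK m n g) (u : Int × Int) (hu1 : 0 ≤ u.1) (hu2 : 0 ≤ u.2) :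
    gget g u.1 u.2 ≤ gget (bumpAll L g) u.1 u.2 := by
  rw [gget_bumpAll hL hg u hu1 hu2]
  omega

-- the conditional-set-building fold (for frontier initialisation)
theorem setFold_spec {m n : Int} (d1 : List (List Int)) :
    ∀ (L : List (Int × Int)) (s : List (Int × Int)), s.Nodup →
    ((L.foldl (fun s v => if gget d1 v.1 v.2 > 9 then PySem.Set.add s v else s) s).Nodup ∧
     ∀ u, u ∈ L.foldl (fun s v => if gget d1 v.1 v.2 > 9 then PySem.Set.add s v else s) s ↔
       u ∈ s ∨ (u ∈ L ∧ gget d1 u.1 u.2 > 9)) := by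
  intro L
  induction L with
  | nil => intro s hs; exact ⟨hs, by simp⟩
  | cons v L ih =>
    intro s hs
    by_cases hv : gget d1 v.1 v.2 > 9
    · have h1 := ih (PySem.Set.add s v) (PySem.Set.nodup_add s v hs)
      simp only [List.foldl_cons, if_pos hv]
      refine ⟨h1.1, ?_⟩
      intro u
      rw [h1.2 u, PySem.Set.mem_add]
      constructor
      · rintro ((h | rfl) | ⟨h, hp⟩)
        · exact Or.inl h
        · exact Or.inr ⟨by simp, hv⟩
        · exact Or.inr ⟨by simp [h], hp⟩
      · rintro (h | ⟨hm, hp⟩)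
        · exact Or.inl (Or.inl h)
        · rcases List.mem_cons.mp hm with rfl | h
          · exact Or.inl (Or.inr rfl)
          · exact Or.inr ⟨h, hp⟩
    · simp only [List.foldl_cons, if_neg hv]
      have h1 := ih s hs
      refine ⟨h1.1, ?_⟩
      intro u
      rw [h1.2 u]
      constructor
      · rintro (h | ⟨h, hp⟩)
        · exact Or.inl h
        · exact Or.inr ⟨by simp [h], hp⟩
      · rintro (h | ⟨hm, hp⟩)
        · exact Or.inl h
        · rcases List.mem_cons.mp hm with rfl | h
          · exact absurd hp hv
          · exact Or.inr ⟨h, hp⟩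

-- the body of aRound's double fold, over the flattened neighbour list
def aStep (m n : Int) (p : List (List Int) × List (Int × Int)) (v : Int × Int) :
    List (List Int) × List (Int × Int) :=
  let g2 := upd2 p.1 v.1 v.2 (· + 1)
  if gget g2 v.1 v.2 > 9 then (g2, PySem.Set.add p.2 v) else (g2, p.2)

theorem aStep_eq (m n : Int) (p : List (List Int) × List (Int × Int)) (v : Int × Int) :
    aStep m n p v = if gget (upd2 p.1 v.1 v.2 (· + 1)) v.1 v.2 > 9
      then (upd2 p.1 v.1 v.2 (· + 1), PySem.Set.add p.2 v)
      else (upd2 p.1 v.1 v.2 (· + 1), p.2) := rfl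

theorem pairFold_spec {m n : Int} :
    ∀ (L : List (Int × Int)), (∀ v ∈ L, v ∈ bCells m n) →
    ∀ (g : List (List Int)), GOK m n g → ∀ (s : List (Int × Int)), s.Nodup →
    (L.foldl (aStep m n) (g, s)).1 = bumpAll L g ∧
    (L.foldl (aStep m n) (g, s)).2.Nodup ∧
    ∀ u, u ∈ (L.foldl (aStep m n) (g, s)).2 ↔
      u ∈ s ∨ (u ∈ L ∧ gget (bumpAll L g) u.1 u.2 > 9) := by
  intro L
  induction L with
  | nil => intro _ g _ s hs; exact ⟨rfl, hs, by simp⟩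
  | cons v L ih =>
    intro hL g hg s hs
    have hv := hL v (by simp)
    have hvc := (mem_bCells m n v).mp hv
    have hval := inbox_valid hg hv
    have hg1 : GOK m n (upd2 g v.1 v.2 (· + 1)) := gok_of_sh (sh_upd2 g v.1 v.2 _) hg
    have hL' : ∀ w ∈ L, w ∈ bCells m n := fun w hw => hL w (by simp [hw])
    have hfinal : bumpAll (v :: L) g = bumpAll L (upd2 g v.1 v.2 (· + 1)) := rfl
    have hmono : gget (upd2 g v.1 v.2 (· + 1)) v.1 v.2
        ≤ gget (bumpAll L (upd2 g v.1 v.2 (· + 1))) v.1 v.2 :=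
      gget_bumpAll_ge hL' hg1 v (by omega) (by omega)
    by_cases hc : gget (upd2 g v.1 v.2 (· + 1)) v.1 v.2 > 9
    · have h1 := ih hL' (upd2 g v.1 v.2 (· + 1)) hg1 (PySem.Set.add s v) (PySem.Set.nodup_add s v hs)
      simp only [List.foldl_cons, aStep_eq, if_pos hc]
      refine ⟨h1.1, h1.2.1, ?_⟩
      intro u
      rw [h1.2.2 u, PySem.Set.mem_add, hfinal]
      constructor
      · rintro ((h | rfl) | ⟨h, hp⟩)
        · exact Or.inl h
        · exact Or.inr ⟨by simp, by omega⟩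
        · exact Or.inr ⟨by simp [h], hp⟩
      · rintro (h | ⟨hm, hp⟩)
        · exact Or.inl (Or.inl h)
        · rcases List.mem_cons.mp hm with rfl | h
          · by_cases hmem : u ∈ L
            · exact Or.inr ⟨hmem, hp⟩
            · exact Or.inl (Or.inr rfl)
          · exact Or.inr ⟨h, hp⟩
    · have h1 := ih hL' (upd2 g v.1 v.2 (· + 1)) hg1 s hs
      simp only [List.foldl_cons, aStep_eq, if_neg hc]
      refine ⟨h1.1, h1.2.1, ?_⟩
      intro u
      rw [h1.2.2 u, hfinal]
      constructor
      · rintro (h | ⟨h, hp⟩)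
        · exact Or.inl h
        · exact Or.inr ⟨by simp [h], hp⟩
      · rintro (h | ⟨hm, hp⟩)
        · exact Or.inl h
        · rcases List.mem_cons.mp hm with rfl | h
          · by_cases hmem : u ∈ L
            · exact Or.inr ⟨hmem, hp⟩
            · -- u = v, not bumped again: final value equals gget g1 v ≤ 9
              exfalso
              have heq := gget_bumpAll hL' hg1 u (by omega) (by omega)
              rw [List.count_eq_zero.mpr hmem] at heq
              omega
          · exact Or.inr ⟨h, hp⟩

theorem aRound_spec {m n : Int} {g : List (List Int)} (hg : GOK m n g)
    {fr : List (Int × Int)} (hfr : ∀ w ∈ fr, w ∈ bCells m n) :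
    (aRound m n g fr).1 = bumpAll (fr.flatMap (aAdj m n)) g ∧
    (aRound m n g fr).2.Nodup ∧
    (∀ u, u ∈ (aRound m n g fr).2 ↔
      u ∈ fr.flatMap (aAdj m n) ∧
        gget (bumpAll (fr.flatMap (aAdj m n)) g) u.1 u.2 > 9) := by
  have hL : ∀ v ∈ fr.flatMap (aAdj m n), v ∈ bCells m n := by
    intro v hv
    obtain ⟨w, _, hvw⟩ := List.mem_flatMap.mp hv
    have := (mem_aAdj m n w v).mp hvw
    rw [mem_bCells]
    exact ⟨this.2.2.2.2.2.1, this.2.2.2.2.2.2.1, this.2.2.2.2.2.2.2.1, this.2.2.2.2.2.2.2.2⟩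
  have hmain := pairFold_spec (fr.flatMap (aAdj m n)) hL g hg PySem.Set.empty (by simp [PySem.Set.empty])
  have hfold : aRound m n g fr
      = (fr.flatMap (aAdj m n)).foldl (aStep m n) (g, PySem.Set.empty) := by
    show (fr.foldl (fun p u => (aAdj m n u).foldl (aStep m n) p) (g, PySem.Set.empty) : _)
      = _
    rw [List.foldl_flatMap]
  rw [hfold]
  refine ⟨hmain.1, hmain.2.1, ?_⟩
  intro u
  rw [hmain.2.2 u]
  simp

-- Set.update by a disjoint nodup list is append
theorem set_update_append : ∀ {fr fl : List (Int × Int)}, fr.Nodup →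
    (∀ u ∈ fr, u ∉ fl) → PySem.Set.update fl fr = fl ++ fr := by
  intro fr
  induction fr with
  | nil =>
    intro fl _ _
    show PySem.Set.update fl [] = fl ++ []
    rw [List.append_nil]
    rfl
  | cons a l ih =>
    intro fl hnd hdis
    have ha : (PySem.Set.add fl a) = fl ++ [a] := by
      unfold PySem.Set.add
      simp [List.contains_iff_mem, hdis a (by simp)]
    have : PySem.Set.update fl (a :: l) = PySem.Set.update (PySem.Set.add fl a) l := rfl
    rw [this, ha]
    rw [ih hnd.of_cons]
    · simp
    · intro u hu
      simp only [List.mem_append, List.mem_singleton]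
      rintro (h | rfl)
      · exact hdis u (by simp [hu]) h
      · exact (List.nodup_cons.mp hnd).1 hu

theorem nodup_length_le {l1 l2 : List (Int × Int)} (h1 : l1.Nodup) (h2 : ∀ x ∈ l1, x ∈ l2) :
    l1.length ≤ l2.length := by
  have ha : l1.toFinset.card = l1.length := List.toFinset_card_of_nodup h1
  have hb : l1.toFinset ⊆ l2.toFinset := by
    intro x hx
    simp only [List.mem_toFinset] at *
    exact h2 x hx
  have := Finset.card_le_card hb
  have := List.toFinset_card_le l2
  omega

-- ---------- the A-side loop ----------
-- full invariant for aLoop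
def AInv (data : List (List Int)) (m n : Int) (g : List (List Int))
    (fr fl : List (Int × Int)) : Prop :=
  Sh g data ∧
  (∀ i j : Nat, n ≤ (j : Int) → gget g i j = gget data i j) ∧
  (∀ u ∈ bCells m n, gget g u.1 u.2 = pval data m n fl u) ∧
  fl.Nodup ∧ (∀ u ∈ fl, u ∈ bCells m n) ∧
  fr.Nodup ∧ (∀ u ∈ fr, u ∈ bCells m n ∧ u ∉ fl) ∧
  (∀ u ∈ bCells m n, u ∉ fl → (u ∈ fr ↔ gget g u.1 u.2 > 9)) ∧
  SuppFrom data m n [] fl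

theorem aLoop_spec {data : List (List Int)} {m n : Int} (hgok : GOK m n data) :
    ∀ (fuel : Nat) (g : List (List Int)) (fr fl : List (Int × Int)),
    AInv data m n g fr fl → (bCells m n).length + 1 ≤ fuel + fl.length →
    AInv data m n (aLoop m n fuel g fr fl).1 [] (aLoop m n fuel g fr fl).2 ∧
    IsClosedSet data m n (aLoop m n fuel g fr fl).2 := by
  intro fuel
  induction fuel with
  | zero =>
    intro g fr fl hinv hb
    exfalso
    obtain ⟨_, _, _, hflnd, hflc, _⟩ := hinv
    have := nodup_length_le hflnd hflc
    omega
  | succ fuel ih =>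
    intro g fr fl hinv hb
    obtain ⟨hSh, hOut, hVal, hflnd, hflc, hfrnd, hfrc, hFr, hSupp⟩ := hinv
    by_cases hfre : fr.isEmpty
    · have hfr0 : fr = [] := List.isEmpty_iff.mp hfre
      subst hfr0
      simp only [aLoop, if_pos hfre]
      refine ⟨⟨hSh, hOut, hVal, hflnd, hflc, hfrnd, hfrc, hFr, hSupp⟩, ?_⟩
      intro u hu hufl
      have hiff := hFr u hu hufl
      have hval := hVal u hu
      have hnot : ¬ gget g u.1 u.2 > 9 := by
        intro hgt
        have : u ∈ ([] : List (Int × Int)) := hiff.mpr hgt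
        simp at this
      omega
    · have hfrne : fr ≠ [] := fun hc => by simp [hc] at hfre
      simp only [aLoop]
      rw [if_neg hfre]
      have hgokg : GOK m n g := gok_of_sh hSh hgok
      have hfrcells : ∀ w ∈ fr, w ∈ bCells m n := fun w hw => (hfrc w hw).1
      obtain ⟨hr1, hr2, hr3⟩ := aRound_spec hgokg hfrcells
      have hfl' : PySem.Set.update fl fr = fl ++ fr :=
        set_update_append hfrnd (fun u hu => (hfrc u hu).2)
      have hallc : ∀ v ∈ fr.flatMap (aAdj m n), v ∈ bCells m n := by
        intro v hv
        obtain ⟨w, _, hvw⟩ := List.mem_flatMap.mp hv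
        have := (mem_aAdj m n w v).mp hvw
        rw [mem_bCells]
        exact ⟨this.2.2.2.2.2.1, this.2.2.2.2.2.2.1, this.2.2.2.2.2.2.2.1,
          this.2.2.2.2.2.2.2.2⟩
      have hdisj : ∀ x ∈ fr, x ∉ fl := fun x hx => (hfrc x hx).2
      -- the new grid
      have hsh' : Sh (aRound m n g fr).1 data := by
        rw [hr1]; exact sh_trans (sh_bumpAll _ _) hSh
      have hval' : ∀ u ∈ bCells m n,
          gget (aRound m n g fr).1 u.1 u.2 = pval data m n (fl ++ fr) u := by
        intro u hu
        have huc := (mem_bCells m n u).mp hu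
        rw [hr1, gget_bumpAll hallc hgokg u (by omega) (by omega)]
        rw [count_flatMap_aAdj hfrnd hfrcells hu, hVal u hu]
        unfold pval
        rw [cnt_append_disjoint hdisj]
        push_cast
        ring
      have hout' : ∀ i j : Nat, n ≤ (j : Int) →
          gget (aRound m n g fr).1 i j = gget data i j := by
        intro i j hj
        have hnm : ((i : Int), (j : Int)) ∉ fr.flatMap (aAdj m n) := by
          intro hc
          have := (mem_bCells m n _).mp (hallc _ hc)
          simp at this
          omega
        rw [hr1]
        have := gget_bumpAll hallc hgokg ((i : Int), (j : Int)) (by positivity) (by positivity)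
        simp only at this
        rw [this, List.count_eq_zero.mpr hnm, hOut i j hj]
        simp
      -- invariants for the new flash set
      have hflnd' : (fl ++ fr).Nodup := by
        rw [List.nodup_append]
        exact ⟨hflnd, hfrnd, fun a ha b hb he => (hfrc b hb).2 (he ▸ ha)⟩
      have hflc' : ∀ u ∈ fl ++ fr, u ∈ bCells m n := by
        intro u hu
        rcases List.mem_append.mp hu with h | h
        · exact hflc u h
        · exact hfrcells u h
      have hsupp' : SuppFrom data m n [] (fl ++ fr) := by
        refine suppFrom_append hSupp ?_
        have : ([] : List (Int × Int)) ++ fl = fl := by simp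
        rw [this]
        refine suppFrom_of_forced hfrnd ?_
        intro u hu
        refine ⟨(hfrc u hu).1, (hfrc u hu).2, ?_⟩
        have := (hFr u (hfrc u hu).1 (hfrc u hu).2).mp hu
        rw [hVal u (hfrc u hu).1] at this
        exact this
      -- the new frontier
      have hfrnd' : (PySem.Set.diff (aRound m n g fr).2 (fl ++ fr)).Nodup :=
        PySem.Set.nodup_diff _ _ hr2
      have hfrc' : ∀ u ∈ PySem.Set.diff (aRound m n g fr).2 (fl ++ fr),
          u ∈ bCells m n ∧ u ∉ fl ++ fr := by
        intro u hu
        rw [PySem.Set.mem_diff] at hu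
        exact ⟨hallc u ((hr3 u).mp hu.1).1, hu.2⟩
      have hFr' : ∀ u ∈ bCells m n, u ∉ fl ++ fr →
          (u ∈ PySem.Set.diff (aRound m n g fr).2 (fl ++ fr) ↔
            gget (aRound m n g fr).1 u.1 u.2 > 9) := by
        intro u hu hnfl
        have huc := (mem_bCells m n u).mp hu
        rw [PySem.Set.mem_diff]
        constructor
        · rintro ⟨hnf, -⟩
          rw [hr1]
          exact ((hr3 u).mp hnf).2
        · intro hgt
          refine ⟨?_, hnfl⟩
          rw [hr3 u]
          by_cases hB : u ∈ fr.flatMap (aAdj m n)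
          · exact ⟨hB, by rw [← hr1]; exact hgt⟩
          · exfalso
            have hcnt := gget_bumpAll hallc hgokg u (by omega) (by omega)
            rw [List.count_eq_zero.mpr hB] at hcnt
            rw [hr1, hcnt] at hgt
            simp at hgt
            have hufl : u ∉ fl := fun hc => hnfl (List.mem_append.mpr (Or.inl hc))
            have := (hFr u hu hufl).mpr hgt
            exact hnfl (List.mem_append.mpr (Or.inr this))
      -- fuel arithmetic
      have hlen : 1 ≤ fr.length := by
        cases fr with
        | nil => exact absurd rfl hfrne
        | cons a l => simp
      rw [hfl']
      exact ih (aRound m n g fr).1 (PySem.Set.diff (aRound m n g fr).2 (fl ++ fr)) (fl ++ fr)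
        ⟨hsh', hout', hval', hflnd', hflc', hfrnd', hfrc', hFr', hsupp'⟩
        (by rw [List.length_append]; omega)

-- ---------- the B-side loop ----------
theorem bVal_eq_pval (data : List (List Int)) (m n : Int) (s : List (Int × Int))
    (u : Int × Int) : bVal data m n u.1 u.2 s = pval data m n s u := by
  unfold bVal pval cnt
  rw [bNbs_eq_aAdj]

theorem bLoop_spec {data : List (List Int)} {m n : Int} :
    ∀ (fuel : Nat) (fl : List (Int × Int)),
    fl.Nodup → (∀ u ∈ fl, u ∈ bCells m n) → SuppFrom data m n [] fl →
    (bCells m n).length + 1 ≤ fuel + fl.length →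
    (bLoop data m n fuel fl).Nodup ∧ (∀ u ∈ bLoop data m n fuel fl, u ∈ bCells m n) ∧
    SuppFrom data m n [] (bLoop data m n fuel fl) ∧
    IsClosedSet data m n (bLoop data m n fuel fl) := by
  intro fuel
  induction fuel with
  | zero =>
    intro fl hnd hc _ hb
    exfalso
    have := nodup_length_le hnd hc
    omega
  | succ fuel ih =>
    intro fl hnd hc hsupp hb
    have hmem : ∀ u, u ∈ (bCells m n).filter
        (fun u => !fl.contains u && decide (bVal data m n u.1 u.2 fl > 9)) ↔
        u ∈ bCells m n ∧ u ∉ fl ∧ pval data m n fl u > 9 := by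
      intro u
      rw [List.mem_filter]
      rw [bVal_eq_pval]
      simp [List.contains_iff_mem, and_assoc]
    by_cases hce : ((bCells m n).filter
        (fun u => !fl.contains u && decide (bVal data m n u.1 u.2 fl > 9))).isEmpty
    · have hnil := List.isEmpty_iff.mp hce
      simp only [bLoop, if_pos hce]
      refine ⟨hnd, hc, hsupp, ?_⟩
      intro u hu hufl
      by_contra hgt
      have : u ∈ ((bCells m n).filter
          (fun u => !fl.contains u && decide (bVal data m n u.1 u.2 fl > 9))) :=
        (hmem u).mpr ⟨hu, hufl, by omega⟩
      rw [hnil] at this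
      simp at this
    · simp only [bLoop, if_neg hce]
      have hnewnd : ((bCells m n).filter
          (fun u => !fl.contains u && decide (bVal data m n u.1 u.2 fl > 9))).Nodup :=
        (nodup_bCells m n).filter _
      have hdisj : ∀ u ∈ (bCells m n).filter
          (fun u => !fl.contains u && decide (bVal data m n u.1 u.2 fl > 9)), u ∉ fl :=
        fun u hu => ((hmem u).mp hu).2.1
      rw [set_update_append hnewnd hdisj]
      have hnd' : (fl ++ (bCells m n).filter
          (fun u => !fl.contains u && decide (bVal data m n u.1 u.2 fl > 9))).Nodup := by
        rw [List.nodup_append]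
        exact ⟨hnd, hnewnd, fun a ha b hb he => hdisj b hb (he ▸ ha)⟩
      have hc' : ∀ u ∈ fl ++ (bCells m n).filter
          (fun u => !fl.contains u && decide (bVal data m n u.1 u.2 fl > 9)),
          u ∈ bCells m n := by
        intro u hu
        rcases List.mem_append.mp hu with h | h
        · exact hc u h
        · exact ((hmem u).mp h).1
      have hsupp' : SuppFrom data m n [] (fl ++ (bCells m n).filter
          (fun u => !fl.contains u && decide (bVal data m n u.1 u.2 fl > 9))) := by
        refine suppFrom_append hsupp ?_
        have h0 : ([] : List (Int × Int)) ++ fl = fl := by simp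
        rw [h0]
        refine suppFrom_of_forced hnewnd ?_
        intro u hu
        exact ⟨((hmem u).mp hu).1, ((hmem u).mp hu).2.1, ((hmem u).mp hu).2.2⟩
      have hlen : 1 ≤ ((bCells m n).filter
          (fun u => !fl.contains u && decide (bVal data m n u.1 u.2 fl > 9))).length := by
        by_contra hl
        have : ((bCells m n).filter
            (fun u => !fl.contains u && decide (bVal data m n u.1 u.2 fl > 9))) = [] := by
          cases hx : ((bCells m n).filter
              (fun u => !fl.contains u && decide (bVal data m n u.1 u.2 fl > 9))) with
          | nil => rfl
          | cons a l => rw [hx] at hl; simp at hl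
        exact hce (by rw [this]; rfl)
      exact ih _ hnd' hc' hsupp' (by rw [List.length_append]; omega)

-- ---------- uniqueness of the flash set ----------
theorem flash_unique {data : List (List Int)} {m n : Int} {LA LB : List (Int × Int)}
    (hA : SuppFrom data m n [] LA) (hAc : IsClosedSet data m n LA)
    (hB : SuppFrom data m n [] LB) (hBc : IsClosedSet data m n LB) :
    ∀ x, x ∈ LA ↔ x ∈ LB := by
  intro x
  constructor
  · intro hx
    exact supp_subset_closed hBc hA (by simp) x hx
  · intro hx
    exact supp_subset_closed hAc hB (by simp) x hx

theorem sh_symm {g h : List (List Int)} (hs : Sh g h) : Sh h g := by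
  unfold Sh at *; rw [hs]

theorem gget_oob_row {g : List (List Int)} {i : Int} (j : Int) (h : g.length ≤ i.toNat) :
    gget g i j = 0 := by
  unfold gget
  have h1 : g.getD i.toNat [] = [] := by
    rw [List.getD_eq_getElem?_getD, List.getElem?_eq_none (by omega)]
    rfl
  rw [h1]
  simp

-- ---------- grid extensionality ----------
theorem grid_ext {g h : List (List Int)} (hs : Sh g h)
    (he : ∀ i j : Nat, gget g i j = gget h i j) : g = h := by
  have hlen : g.length = h.length := by
    have := congrArg List.length hs; simpa using this
  apply List.ext_getElem hlen
  intro i hi hi'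
  have hrl : g[i].length = h[i].length := by
    have h2 : (g.map List.length)[i]? = (h.map List.length)[i]? := by rw [hs]
    rw [List.getElem?_map, List.getElem?_map, List.getElem?_eq_getElem hi,
      List.getElem?_eq_getElem hi'] at h2
    simpa using h2
  apply List.ext_getElem hrl
  intro j hj hj'
  have hx := he i j
  unfold gget at hx
  rw [Int.toNat_natCast, Int.toNat_natCast] at hx
  rw [List.getD_eq_getElem _ _ hi, List.getD_eq_getElem _ _ hi',
    List.getD_eq_getElem _ _ hj, List.getD_eq_getElem _ _ hj'] at hx
  exact hx

theorem step_eq_alt (data : List (List Int)) (hne : data ≠ [])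
    (hrows : ∀ row ∈ data, (data.headI).length ≤ row.length) :
    step data = step_alt data := by
  unfold step step_alt
  simp only []
  set m : Int := (data.length : Int) with hm
  set n : Int := ((data.headI).length : Int) with hn
  have hgok : GOK m n data := ⟨hm.symm, fun row hr => by
    have := hrows row hr; omega⟩
  have hcl : (bCells m n).length = data.length * (data.headI).length := by
    rw [length_bCells, hm, hn, Int.toNat_natCast, Int.toNat_natCast]
  -- the +1 pass
  have hd1eq : (PySem.List.pyRange 0 m 1).foldl (fun g i =>
        (PySem.List.pyRange 0 n 1).foldl (fun g j => upd2 g i j (· + 1)) g) data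
      = posFold (fun _ o => o + 1) (bCells m n) data := by
    unfold posFold bCells
    rw [List.foldl_flatMap]
    simp only [List.foldl_map]
  rw [hd1eq]
  have hgokd1 : GOK m n (posFold (fun _ o => o + 1) (bCells m n) data) :=
    gok_of_sh (sh_posFold _ _ _) hgok
  have hVal1 : ∀ u ∈ bCells m n,
      gget (posFold (fun _ o => o + 1) (bCells m n) data) u.1 u.2
        = pval data m n [] u := by
    intro u hu
    have huc := (mem_bCells m n u).mp hu
    rw [gget_posFold (fun _ o => o + 1) (nodup_bCells m n) (fun v hv => hv) hgok u
      (by omega) (by omega), if_pos hu]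
    unfold pval
    rw [cnt_nil]
    simp
  have hOut1 : ∀ i j : Nat, n ≤ (j : Int) →
      gget (posFold (fun _ o => o + 1) (bCells m n) data) i j = gget data i j := by
    intro i j hj
    have hno : ((i : Int), (j : Int)) ∉ bCells m n := by
      intro hc
      have := (mem_bCells m n _).mp hc
      simp at this
      omega
    have := gget_posFold (m := m) (n := n) (fun _ o => o + 1) (nodup_bCells m n)
      (fun v hv => hv) hgok ((i : Int), (j : Int)) (by positivity) (by positivity)
    simp only at this
    rw [this, if_neg hno]
  -- the initial frontier
  have hfr0eq : (PySem.List.pyRange 0 m 1).foldl (fun s i =>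
        (PySem.List.pyRange 0 n 1).foldl (fun s j =>
          if gget (posFold (fun _ o => o + 1) (bCells m n) data) i j > 9
          then PySem.Set.add s (i, j) else s) s) PySem.Set.empty
      = (bCells m n).foldl (fun s v =>
          if gget (posFold (fun _ o => o + 1) (bCells m n) data) v.1 v.2 > 9
          then PySem.Set.add s v else s) PySem.Set.empty := by
    unfold bCells
    rw [List.foldl_flatMap]
    simp only [List.foldl_map]
  rw [hfr0eq]
  obtain ⟨hfr0nd, hfr0mem⟩ := setFold_spec (m := m) (n := n)
    (posFold (fun _ o => o + 1) (bCells m n) data) (bCells m n) PySem.Set.empty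
    (by simp [PySem.Set.empty])
  -- run the A loop
  have hinv0 : AInv data m n (posFold (fun _ o => o + 1) (bCells m n) data)
      ((bCells m n).foldl (fun s v =>
          if gget (posFold (fun _ o => o + 1) (bCells m n) data) v.1 v.2 > 9
          then PySem.Set.add s v else s) PySem.Set.empty) [] := by
    refine ⟨sh_posFold _ _ _, hOut1, hVal1, by simp, by simp, hfr0nd, ?_, ?_, trivial⟩
    · intro u hu
      have := (hfr0mem u).mp hu
      simp [PySem.Set.empty] at this
      exact ⟨this.1, by simp⟩
    · intro u hu _
      rw [hfr0mem u]
      simp [PySem.Set.empty, hu]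
  obtain ⟨hAfin, hAclosed⟩ := aLoop_spec hgok (data.length * (data.headI).length + 1)
    _ _ _ hinv0 (by omega)
  obtain ⟨hSh2, hOut2, hVal2, hflAnd, hflAc, -, -, -, hsuppA⟩ := hAfin
  -- run the B loop
  obtain ⟨hBnd, hBc, hBsupp, hBclosed⟩ := bLoop_spec (data := data) (m := m) (n := n)
    (data.length * (data.headI).length + 1) [] (by simp) (by simp) trivial (by omega)
  -- the two flash sets agree
  have hmemAB := flash_unique hsuppA hAclosed hBsupp hBclosed
  have hlenAB : (aLoop m n (data.length * (data.headI).length + 1)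
        (posFold (fun _ o => o + 1) (bCells m n) data)
        ((bCells m n).foldl (fun s v =>
          if gget (posFold (fun _ o => o + 1) (bCells m n) data) v.1 v.2 > 9
          then PySem.Set.add s v else s) PySem.Set.empty) []).2.length
      = (bLoop data m n (data.length * (data.headI).length + 1) []).length :=
    ((List.perm_ext_iff_of_nodup hflAnd hBnd).mpr hmemAB).length_eq
  -- the write-back of B as a posFold
  have hgBeq : (PySem.List.pyRange 0 m 1).foldl (fun g i =>
        (PySem.List.pyRange 0 n 1).foldl (fun g j =>
          upd2 g i j (fun _ =>
            if (bLoop data m n (data.length * (data.headI).length + 1) []).contains (i, j)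
            then 0
            else bVal data m n i j
              (bLoop data m n (data.length * (data.headI).length + 1) []))) g) data
      = posFold (fun v _ =>
          if (bLoop data m n (data.length * (data.headI).length + 1) []).contains v
          then 0
          else bVal data m n v.1 v.2
            (bLoop data m n (data.length * (data.headI).length + 1) []))
          (bCells m n) data := by
    unfold posFold bCells
    rw [List.foldl_flatMap]
    simp only [List.foldl_map]
  rw [hgBeq]
  have hgok2 : GOK m n (aLoop m n (data.length * (data.headI).length + 1)
      (posFold (fun _ o => o + 1) (bCells m n) data)
      ((bCells m n).foldl (fun s v =>
        if gget (posFold (fun _ o => o + 1) (bCells m n) data) v.1 v.2 > 9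
        then PySem.Set.add s v else s) PySem.Set.empty) []).1 := gok_of_sh hSh2 hgok
  -- grid equality
  refine Prod.ext ?_ (by rw [hlenAB])
  refine grid_ext ?_ ?_
  · exact sh_trans (sh_trans (sh_posFold _ _ _) hSh2) (sh_symm (sh_posFold _ _ _))
  · intro i j
    have hA3 := gget_posFold (m := m) (n := n) (fun _ _ => (0 : Int)) hflAnd hflAc hgok2
      ((i : Int), (j : Int)) (by positivity) (by positivity)
    have hB3 := gget_posFold (m := m) (n := n) (fun v _ =>
        if (bLoop data m n (data.length * (data.headI).length + 1) []).contains v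
        then 0
        else bVal data m n v.1 v.2
          (bLoop data m n (data.length * (data.headI).length + 1) []))
      (nodup_bCells m n) (fun v hv => hv) hgok
      ((i : Int), (j : Int)) (by positivity) (by positivity)
    simp only at hA3 hB3
    show gget (posFold (fun _ _ => (0 : Int)) _ _) _ _ = gget (posFold _ _ _) _ _
    rw [hA3, hB3]
    by_cases hu : ((i : Int), (j : Int)) ∈ bCells m n
    · rw [if_pos hu]
      have hcb : (bLoop data m n (data.length * (data.headI).length + 1) []).contains
          ((i : Int), (j : Int))
          = decide (((i : Int), (j : Int)) ∈
            (bLoop data m n (data.length * (data.headI).length + 1) [])) := by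
        simp [List.contains_iff_mem]
      by_cases hfA : ((i : Int), (j : Int)) ∈ (aLoop m n
          (data.length * (data.headI).length + 1)
          (posFold (fun _ o => o + 1) (bCells m n) data)
          ((bCells m n).foldl (fun s v =>
            if gget (posFold (fun _ o => o + 1) (bCells m n) data) v.1 v.2 > 9
            then PySem.Set.add s v else s) PySem.Set.empty) []).2
      · rw [if_pos hfA]
        have hfB := (hmemAB _).mp hfA
        rw [if_pos (by simp [List.contains_iff_mem, hfB])]
      · rw [if_neg hfA]
        have hfB : ((i : Int), (j : Int)) ∉
            (bLoop data m n (data.length * (data.headI).length + 1) []) :=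
          fun hc => hfA ((hmemAB _).mpr hc)
        rw [if_neg (by simp [List.contains_iff_mem, hfB])]
        rw [hVal2 _ hu]
        have hbv : bVal data m n (i : Int) (j : Int)
              (bLoop data m n (data.length * (data.headI).length + 1) [])
            = pval data m n (bLoop data m n (data.length * (data.headI).length + 1) [])
              ((i : Int), (j : Int)) :=
          bVal_eq_pval data m n _ ((i : Int), (j : Int))
        rw [hbv]
        exact pval_congr hmemAB _
    · rw [if_neg hu]
      have hfA : ((i : Int), (j : Int)) ∉ (aLoop m n
          (data.length * (data.headI).length + 1)
          (posFold (fun _ o => o + 1) (bCells m n) data)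
          ((bCells m n).foldl (fun s v =>
            if gget (posFold (fun _ o => o + 1) (bCells m n) data) v.1 v.2 > 9
            then PySem.Set.add s v else s) PySem.Set.empty) []).2 :=
        fun hc => hu (hflAc _ hc)
      rw [if_neg hfA]
      have hcases : m ≤ (i : Int) ∨ n ≤ (j : Int) := by
        rw [mem_bCells] at hu
        simp at hu
        omega
      rcases hcases with hcase | hcase
      · -- row out of range: both sides are the getD default 0
        have hlen2 : (aLoop m n (data.length * (data.headI).length + 1)
            (posFold (fun _ o => o + 1) (bCells m n) data)
            ((bCells m n).foldl (fun s v =>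
              if gget (posFold (fun _ o => o + 1) (bCells m n) data) v.1 v.2 > 9
              then PySem.Set.add s v else s) PySem.Set.empty) []).1.length = data.length := by
          have := congrArg List.length hSh2; simpa using this
        rw [gget_oob_row _ (by omega), gget_oob_row _ (by omega)]
      · exact hOut2 i j hcase

-- ===== VERDICT (by name: the statement is the Claim_ definition above) =====
theorem step_spec : Claim_equal_step := by
  intro data _hDom hPre
  unfold Spec_step
  exact step_eq_alt data hPre.1 hPre.2
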